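-- pv_equiv track=rewrite | github.com/MaxWolf-01/TruthTabler | src/bool_expressions.py | get_expression_levels
-- ===== SOURCE A (Python) =====
-- def get_expression_levels(expr):
--     """
--     :returns: dictionary with the level of depth of each part of the expression. Brackets are ignored in the result.
--     e.g.: ['A', 'OR', 'B', 'AND', '(', 'A', 'IF', '(', 'NOT', 'C', 'IF', 'D', ')', ')']
--     => {0: [0, 1, 2, 3], 1: [5, 6], 2: [8, 9, 10, 11]}
--     """
--     level = 0
--     levels = dict()
--     for i, x in enumerate(expr):
--         if x == '(':
--             level += 1
--         elif x == ')':
--             level -= 1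
--         else:
--             levels.setdefault(level, []).append(i)
--     return levels
-- ===== SOURCE B (Python) =====
-- def get_expression_levels(expr):
--     # Two-pass alternative: precompute a depth table by prefix sums, then group.
--     depth = []
--     d = 0
--     for x in expr:
--         d += (x == '(') - (x == ')')
--         depth.append(d)
--     levels = {}
--     for i, x in enumerate(expr):
--         if x != '(' and x != ')':
--             levels.setdefault(depth[i], []).append(i)
--     return levels
-- ===== Notes on version B (the rewrite author's own statement) =====
-- stated objective: alternative
-- what changed: Splits A's single stateful loop into two passes: a precomputed prefix-sum depth table, then a separate grouping pass over non-bracket indices.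
import Mathlib
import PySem

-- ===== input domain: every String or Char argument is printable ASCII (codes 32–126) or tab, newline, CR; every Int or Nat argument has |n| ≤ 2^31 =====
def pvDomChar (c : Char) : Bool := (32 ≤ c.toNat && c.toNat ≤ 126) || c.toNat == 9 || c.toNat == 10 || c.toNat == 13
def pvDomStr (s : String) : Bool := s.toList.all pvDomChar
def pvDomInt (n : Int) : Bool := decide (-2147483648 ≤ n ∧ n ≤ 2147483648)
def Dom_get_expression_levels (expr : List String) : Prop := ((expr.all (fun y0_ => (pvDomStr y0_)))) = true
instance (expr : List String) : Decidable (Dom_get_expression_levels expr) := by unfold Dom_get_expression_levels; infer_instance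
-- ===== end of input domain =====

-- B replaces A's single stateful loop by a precomputed prefix-sum depth table plus a
-- separate grouping pass (alternative decomposition, same cost).

-- ===== PORT A =====
-- A's loop: index i, running level, dict; setdefault(level, []).append(i) = modify level [] (· ++ [i])
def pvGoA (i : Nat) (level : Int) (levels : PySem.Dict Int (List Int)) :
    List String → PySem.Dict Int (List Int)
  | [] => levels
  | x :: xs =>
    if x = "(" then pvGoA (i + 1) (level + 1) levels xs
    else if x = ")" then pvGoA (i + 1) (level - 1) levels xs
    else pvGoA (i + 1) level (levels.modify level [] (· ++ [(i : Int)])) xs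

def get_expression_levels (expr : List String) : List (Int × List Int) :=
  (pvGoA 0 0 PySem.Dict.empty expr).items

-- ===== PORT B =====
-- (x == '(') - (x == ')')
def pvDelta (x : String) : Int :=
  (if x = "(" then 1 else 0) - (if x = ")" then 1 else 0)

-- first pass of Source B: running prefix sums of the deltas (depth[i])
def pvDepths (d : Int) : List String → List Int
  | [] => []
  | x :: xs => (d + pvDelta x) :: pvDepths (d + pvDelta x) xs

-- second pass of Source B: group non-bracket indices by their table depth
def pvGoB (i : Nat) (levels : PySem.Dict Int (List Int)) :
    List (String × Int) → PySem.Dict Int (List Int)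
  | [] => levels
  | (x, dv) :: rest =>
    if x ≠ "(" ∧ x ≠ ")" then pvGoB (i + 1) (levels.modify dv [] (· ++ [(i : Int)])) rest
    else pvGoB (i + 1) levels rest

def get_expression_levels_alt (expr : List String) : List (Int × List Int) :=
  (pvGoB 0 PySem.Dict.empty (expr.zip (pvDepths 0 expr))).items

-- ===== PRECONDITION & SPEC =====
def Spec_get_expression_levels (expr : List String) (out : List (Int × List Int)) : Prop := out = get_expression_levels_alt expr
instance (expr : List String) (out : List (Int × List Int)) : Decidable (Spec_get_expression_levels expr out) := by unfold Spec_get_expression_levels; infer_instance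

-- ===== CLAIM (what is proved, stated in full; the proofs are below) =====
def Claim_equal_get_expression_levels : Prop := ∀ (expr : List String), Dom_get_expression_levels expr → Spec_get_expression_levels expr (get_expression_levels expr)

-- ===== LEMMAS AND PROOFS =====
theorem pvGo_eq (xs : List String) : ∀ (i : Nat) (level : Int) (levels : PySem.Dict Int (List Int)),
    pvGoA i level levels xs = pvGoB i levels (xs.zip (pvDepths level xs)) := by
  induction xs with
  | nil => intro i level levels; rfl
  | cons x xs ih =>
    intro i level levels
    by_cases h1 : x = "("
    · simp [pvGoA, pvGoB, pvDepths, pvDelta, h1, ih]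
    · by_cases h2 : x = ")"
      · simp [pvGoA, pvGoB, pvDepths, pvDelta, h2, ih, sub_eq_add_neg]
      · simp [pvGoA, pvGoB, pvDepths, pvDelta, h1, h2, ih]

-- ===== VERDICT (by name: the statement is the Claim_ definition above) =====
theorem get_expression_levels_spec : Claim_equal_get_expression_levels := by
  intro expr _
  unfold Spec_get_expression_levels get_expression_levels get_expression_levels_alt
  rw [pvGo_eq]
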